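-- pv_equiv track=rewrite | github.com/AlimAlb/algo_basics | контест №1/E.py | count
-- ===== SOURCE A (Python) =====
-- def count(n, k):
--     counter = 0
--     while n > 0:
--         if n % k == 0:
--             n = n // k
--             counter += 1
--         else:
--             counter += n % k
--             n -= n % k
--
--     return counter
-- ===== SOURCE B (Python) =====
-- def count(n, k):
--     if n <= 0:
--         return 0
--     digits = []
--     while n > 0:
--         digits.append(n % k)
--         n //= k
--     return sum(digits) + len(digits) - 1
-- ===== Notes on version B (the rewrite author's own statement) =====
-- stated objective: simpler
-- what changed: B first materialises the base-k digit list of n (one divmod per digit) and then returns its sum plus its length minus one (the divisions recovered in closed form as digits-1), instead of A's branchy subtract-then-divide two-phase loop with a running counter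
-- outside the precondition, e.g. on count(5, -2): A returns 0, B returns -1
import Mathlib
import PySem

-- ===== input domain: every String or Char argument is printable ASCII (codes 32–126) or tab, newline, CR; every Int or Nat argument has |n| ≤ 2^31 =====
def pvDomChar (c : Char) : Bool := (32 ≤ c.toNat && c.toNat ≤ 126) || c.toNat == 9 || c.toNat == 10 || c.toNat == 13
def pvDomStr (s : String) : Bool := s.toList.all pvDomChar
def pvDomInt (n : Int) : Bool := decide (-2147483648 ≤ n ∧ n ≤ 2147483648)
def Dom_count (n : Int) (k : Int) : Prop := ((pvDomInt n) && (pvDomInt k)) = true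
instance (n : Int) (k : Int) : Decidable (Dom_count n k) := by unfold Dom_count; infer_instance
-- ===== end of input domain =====

-- B builds the base-k digit list of n and returns digit sum + digit count - 1
-- (divisions recovered in closed form), replacing A's branchy subtract-then-divide
-- loop with a running counter (objective: simpler).

-- ===== PORT A =====
-- A's while-loop as fuel recursion; on Pre_count inputs n strictly decreases each
-- iteration, so fuel n.toNat is exact (never exhausted before the loop exits).
def countLoopA (k : Int) : Nat → Int → Int → Int
  | 0, _, counter => counter
  | fuel+1, n, counter =>
    if n > 0 then
      if PySem.Int.mod n k = 0 then
        countLoopA k fuel (PySem.Int.floordiv n k) (counter + 1)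
      else
        countLoopA k fuel (n - PySem.Int.mod n k) (counter + PySem.Int.mod n k)
    else counter

def count (n : Int) (k : Int) : Int := countLoopA k n.toNat n 0

-- ===== PORT B =====
-- first pass of Source B: the list of base-k digits of n, least significant first
def digitsB (k : Int) : Nat → Int → List Int
  | 0, _ => []
  | fuel+1, n =>
    if n > 0 then PySem.Int.mod n k :: digitsB k fuel (PySem.Int.floordiv n k)
    else []

def count_alt (n : Int) (k : Int) : Int :=
  if n ≤ 0 then 0
  else
    let ds := digitsB k n.toNat n
    ds.sum + ds.length - 1

-- ===== PRECONDITION & SPEC =====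
-- Pre_ excludes n > 0 with k ≤ 1: there A raises ZeroDivisionError (k = 0) or loops
-- forever (k = 1), and for negative k — outside any base-k reading of the task — A's
-- returned value is an accident of its subtract-then-divide order and B's of its
-- divmod order; neither value is specified, so these corners are carved out.
def Pre_count (n : Int) (k : Int) : Prop := n ≤ 0 ∨ 2 ≤ k
instance (n : Int) (k : Int) : Decidable (Pre_count n k) := by unfold Pre_count; infer_instance

def pvWitness_count : Int × Int := (100, 3)

def Spec_count (n : Int) (k : Int) (out : Int) : Prop := out = count_alt n k
instance (n : Int) (k : Int) (out : Int) : Decidable (Spec_count n k out) := by unfold Spec_count; infer_instance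

-- ===== CLAIM (what is proved, stated in full; the proofs are below) =====
def Claim_equal_count : Prop := ∀ (n : Int) (k : Int), Dom_count n k → Pre_count n k → Spec_count n k (count n k)

-- ===== LEMMAS AND PROOFS =====

theorem countLoopA_nonpos (k : Int) (fuel : Nat) (n c : Int) (h : ¬ n > 0) :
    countLoopA k fuel n c = c := by
  cases fuel <;> simp [countLoopA, h]

theorem digitsB_nonpos (k : Int) (fuel : Nat) (n : Int) (h : ¬ n > 0) :
    digitsB k fuel n = [] := by
  cases fuel <;> simp [digitsB, h]

-- for 2 ≤ k and 0 < n the quotient is nonnegative and strictly smaller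
theorem quot_lt (k n : Int) (hk : 2 ≤ k) (hn : 0 < n) :
    0 ≤ PySem.Int.floordiv n k ∧ PySem.Int.floordiv n k < n := by
  rw [PySem.Int.floordiv_eq_ediv_of_pos (by omega)]
  have h1 : k * (n / k) + n % k = n := Int.mul_ediv_add_emod n k
  have h2 : 0 ≤ n % k := Int.emod_nonneg n (by omega)
  have h3 : n % k < k := Int.emod_lt_of_pos n (by omega)
  constructor
  · nlinarith [sq_nonneg (n / k)]
  · nlinarith [sq_nonneg (n / k)]

theorem digitsB_fuel (k : Int) (hk : 2 ≤ k) (fuel1 : Nat) :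
    ∀ (fuel2 : Nat) (n : Int), 0 ≤ n → n.toNat ≤ fuel1 → n.toNat ≤ fuel2 →
      digitsB k fuel1 n = digitsB k fuel2 n := by
  induction fuel1 with
  | zero =>
    intro fuel2 n hn h1 _
    have hn0 : ¬ n > 0 := by omega
    rw [digitsB_nonpos k 0 n hn0, digitsB_nonpos k fuel2 n hn0]
  | succ f ih =>
    intro fuel2 n hn h1 h2
    by_cases h : n > 0
    · obtain ⟨f2, rfl⟩ : ∃ f2, fuel2 = f2 + 1 := by
        cases fuel2 with
        | zero => omega
        | succ f2 => exact ⟨f2, rfl⟩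
      simp only [digitsB, if_pos h]
      obtain ⟨hq0, hqlt⟩ := quot_lt k n hk h
      rw [ih f2 (PySem.Int.floordiv n k) hq0 (by omega) (by omega)]
    · rw [digitsB_nonpos k _ n h, digitsB_nonpos k fuel2 n h]

-- B's second pass as a value: digit sum + digit count
def digCnt (k : Int) (fuel : Nat) (n : Int) : Int :=
  (digitsB k fuel n).sum + (digitsB k fuel n).length

-- main correspondence: A's loop from (n, c) equals c + digCnt n - 1 for n > 0
theorem loop_main (k : Int) (hk : 2 ≤ k) (fuel1 : Nat) :
    ∀ (fuel2 : Nat) (n c : Int), 0 < n → n.toNat ≤ fuel1 → n.toNat ≤ fuel2 →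
      countLoopA k fuel1 n c = c + digCnt k fuel2 n - 1 := by
  induction fuel1 with
  | zero => intro fuel2 n c hn h1 _; omega
  | succ f ih =>
    intro fuel2 n c hn h1 h2
    obtain ⟨f2, rfl⟩ : ∃ f2, fuel2 = f2 + 1 := by
      cases fuel2 with
      | zero => omega
      | succ f2 => exact ⟨f2, rfl⟩
    have hk0 : (0:Int) < k := by omega
    have hmodE : PySem.Int.mod n k = n % k := PySem.Int.mod_eq_emod_of_pos (by omega)
    have hdivE : PySem.Int.floordiv n k = n / k := PySem.Int.floordiv_eq_ediv_of_pos (by omega)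
    have hr0 : 0 ≤ n % k := Int.emod_nonneg n (by omega)
    have hrk : n % k < k := Int.emod_lt_of_pos n hk0
    obtain ⟨hq0, hqlt⟩ := quot_lt k n hk hn
    rw [hdivE] at hq0 hqlt
    have hnqr : k * (n / k) + n % k = n := Int.mul_ediv_add_emod n k
    -- one unfolding of B's digit list at n
    have hdig : digCnt k (f2+1) n = n % k + digCnt k f2 (n / k) + 1 := by
      simp only [digCnt, digitsB, if_pos hn, hmodE, hdivE, List.sum_cons, List.length_cons]
      push_cast; ring
    simp only [countLoopA, if_pos hn]
    by_cases hr : PySem.Int.mod n k = 0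
    · -- divide branch: q > 0 since n = k*q with n > 0
      rw [if_pos hr]
      have hrz : n % k = 0 := by rw [← hmodE]; exact hr
      have hq : 0 < n / k := by nlinarith [hnqr]
      rw [ih f2 (PySem.Int.floordiv n k) (c + 1) (by rwa [hdivE]) (by omega) (by rw [hdivE]; omega)]
      rw [hdivE, hdig, hrz]; ring
    · -- subtract branch
      rw [if_neg hr]
      have hrz : n % k ≠ 0 := by rwa [← hmodE]
      set m : Int := n - n % k with hm
      have hmE : n - PySem.Int.mod n k = m := by rw [hmodE]
      have hmq : m = k * (n / k) := by omega
      have hm0 : 0 ≤ m := by nlinarith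
      rw [hmE]
      by_cases hmz : m = 0
      · -- n < k: loop ends after adding the remainder
        have hq : n / k = 0 := by nlinarith [hnqr]
        rw [hmz, countLoopA_nonpos k f 0 (c + PySem.Int.mod n k) (by omega)]
        have : digCnt k f2 (n / k) = 0 := by
          simp [digCnt, hq, digitsB_nonpos k f2 0 (by omega)]
        rw [hdig, hmodE, this]; ring
      · have hmpos : 0 < m := by omega
        have hmlt : m < n := by omega
        rw [ih m.toNat m (c + PySem.Int.mod n k) hmpos (by omega) (le_refl _)]
        -- unfold one step of B's digit list at m: digit 0, quotient n / k
        have hmmod : PySem.Int.mod m k = 0 := by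
          rw [PySem.Int.mod_eq_emod_of_pos (by omega), hmq]; exact Int.mul_emod_right k _
        have hmdiv : PySem.Int.floordiv m k = n / k := by
          rw [PySem.Int.floordiv_eq_ediv_of_pos (by omega), hmq]
          exact Int.mul_ediv_cancel_left _ (by omega)
        obtain ⟨g, hg⟩ : ∃ g, m.toNat = g + 1 := ⟨m.toNat - 1, by omega⟩
        have hdigm : digCnt k m.toNat m = 0 + digCnt k g (n / k) + 1 := by
          rw [hg]
          simp only [digCnt, digitsB, if_pos hmpos, hmmod, hmdiv, List.sum_cons, List.length_cons]
          push_cast; ring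
        have hqm : (n / k).toNat ≤ g := by
          have : n / k < m := by nlinarith [hnqr]
          omega
        have hfeq : digCnt k g (n / k) = digCnt k f2 (n / k) := by
          unfold digCnt
          rw [digitsB_fuel k hk g f2 (n / k) hq0 hqm (by omega)]
        rw [hdigm, hfeq, hdig, hmodE]; ring

-- ===== VERDICT (by name: the statement is the Claim_ definition above) =====
theorem count_spec : Claim_equal_count := by
  intro n k _ hpre
  unfold Spec_count count count_alt
  by_cases hn : n ≤ 0
  · rw [if_pos hn, countLoopA_nonpos k n.toNat n 0 (by omega)]
  · have hnp : 0 < n := by omega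
    rcases hpre with h | hk
    · omega
    · rw [if_neg hn]
      have := loop_main k hk n.toNat n.toNat n 0 hnp (le_refl _) (le_refl _)
      simpa [digCnt] using this
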